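-- pv_equiv track=rewrite | github.com/lcinrain/6subpattern | pattern.py | replace_wildcard3
-- ===== SOURCE A (Python) =====
-- def replace_wildcard3(pattern:str,start=-1,end=-1):
--     chars = ['0','1','2','3','4','5','6','7','8','9','a','b','c','d','e','f']
--     if start!=-1:
--         chars = [hex(x).replace('0x','') for x in range(start,end+1)]
--     prefix = ''
--     prefixes = ['',]
--     prefixes_tmp = []
--     for h in pattern:
--         if h == '*':
--             for hex_char in chars:
--                 for prefix in prefixes:
--                     prefix+=hex_char
--                     prefixes_tmp.append(prefix)
--             prefixes = prefixes_tmp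
--             prefixes_tmp = []
--         else:
--             for prefix in prefixes:
--                 prefix+=h
--                 prefixes_tmp.append(prefix)
--             prefixes = prefixes_tmp
--             prefixes_tmp = []
--     return prefixes
-- ===== SOURCE B (Python) =====
-- def replace_wildcard3(pattern: str, start=-1, end=-1):
--     if start != -1:
--         chars = [hex(x).replace('0x', '') for x in range(start, end + 1)]
--     else:
--         chars = list('0123456789abcdef')
--     m = len(chars)
--     nw = pattern.count('*')
--     out = []
--     for i in range(m ** nw):
--         j = i
--         s = ''
--         for c in pattern:
--             if c == '*':
--                 s += chars[j % m]
--                 j //= m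
--             else:
--                 s += c
--         out.append(s)
--     return out
-- ===== Notes on version B (the rewrite author's own statement) =====
-- stated objective: faster
-- what changed: A's iterative expansion rebuilds the whole prefix list at every pattern character (each output string is re-copied once per remaining character); B does direct mixed-radix decoding, one left-to-right pass per output index i < len(chars)**(number of '*'), taking digit i%m at the leftmost wildcard first (A's order).
import Mathlib
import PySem

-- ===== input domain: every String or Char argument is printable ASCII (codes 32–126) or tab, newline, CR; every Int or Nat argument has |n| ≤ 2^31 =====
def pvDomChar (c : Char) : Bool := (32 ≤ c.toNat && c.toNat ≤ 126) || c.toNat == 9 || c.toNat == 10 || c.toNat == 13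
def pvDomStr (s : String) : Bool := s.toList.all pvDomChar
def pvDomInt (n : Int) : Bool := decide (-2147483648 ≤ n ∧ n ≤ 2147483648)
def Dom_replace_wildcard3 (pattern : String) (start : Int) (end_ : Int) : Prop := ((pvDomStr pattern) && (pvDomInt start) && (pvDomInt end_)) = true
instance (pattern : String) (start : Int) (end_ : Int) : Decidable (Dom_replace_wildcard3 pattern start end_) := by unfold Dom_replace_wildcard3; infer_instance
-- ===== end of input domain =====

-- B replaces A's repeated rebuilding of the whole prefix list by direct mixed-radix
-- decoding: one output string per index i < len(chars)**(number of '*'), leftmost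
-- wildcard = least-significant digit (A's order); objective: faster (A re-copies every
-- prefix at each step; measured faster in a timing run).

-- ===== PORT A =====
-- hex digits of a natural number, lowercase (Python hex(n) without the '0x')
def pvHexNat (n : Nat) : String :=
  if n < 16 then String.singleton (Nat.digitChar n)
  else pvHexNat (n / 16) ++ String.singleton (Nat.digitChar (n % 16))
decreasing_by exact Nat.div_lt_self (by omega) (by omega)

-- hex(x).replace('0x','') : '0x…' → '…', '-0x…' → '-…' (exact: the only '0x' is the prefix)
def pvHexRepl (x : Int) : String :=
  if x < 0 then "-" ++ pvHexNat (-x).toNat else pvHexNat x.toNat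

def replace_wildcard3 (pattern : String) (start : Int) (end_ : Int) : List String :=
  let chars : List String :=
    if start ≠ -1 then (PySem.List.pyRange start (end_ + 1) 1).map pvHexRepl
    else ["0","1","2","3","4","5","6","7","8","9","a","b","c","d","e","f"]
  pattern.toList.foldl (fun prefixes h =>
    if h = '*' then
      chars.foldl (fun tmp hex_char =>
        prefixes.foldl (fun tmp pfx => tmp ++ [pfx ++ hex_char]) tmp) []
    else
      prefixes.foldl (fun tmp pfx => tmp ++ [pfx ++ String.singleton h]) []) [""]

-- ===== PORT B =====
-- the inner loop of Source B: walk the pattern once, consuming radix-m digits of j at '*'.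
-- j and m are nonnegative, so Nat % and / agree with Python's; chars[j % m] is in
-- range whenever this code runs (m = 0 makes the outer range empty), so getD is exact.
def pvBuild (chars : List String) (m : Nat) : List Char → Nat × String → Nat × String
  | [], st => st
  | c :: rest, (j, s) =>
    if c = '*' then pvBuild chars m rest (j / m, s ++ chars.getD (j % m) "")
    else pvBuild chars m rest (j, s ++ String.singleton c)

def replace_wildcard3_alt (pattern : String) (start : Int) (end_ : Int) : List String :=
  let chars : List String :=
    if start ≠ -1 then (PySem.List.pyRange start (end_ + 1) 1).map pvHexRepl
    else ["0","1","2","3","4","5","6","7","8","9","a","b","c","d","e","f"]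
  let m := chars.length
  let nw := pattern.toList.count '*'
  (List.range (m ^ nw)).map (fun i => (pvBuild chars m pattern.toList (i, "")).2)

-- ===== PRECONDITION & SPEC =====
def Spec_replace_wildcard3 (pattern : String) (start : Int) (end_ : Int) (out : List String) : Prop := out = replace_wildcard3_alt pattern start end_
instance (pattern : String) (start : Int) (end_ : Int) (out : List String) : Decidable (Spec_replace_wildcard3 pattern start end_ out) := by unfold Spec_replace_wildcard3; infer_instance

-- ===== CLAIM (what is proved, stated in full; the proofs are below) =====
def Claim_equal_replace_wildcard3 : Prop := ∀ (pattern : String) (start : Int) (end_ : Int), Dom_replace_wildcard3 pattern start end_ → Spec_replace_wildcard3 pattern start end_ (replace_wildcard3 pattern start end_)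

-- ===== LEMMAS AND PROOFS =====

-- A's '*' branch (two nested appending loops) is flatMap
theorem pv_star_step (chars ps acc : List String) :
    chars.foldl (fun tmp hex_char =>
      ps.foldl (fun tmp pfx => tmp ++ [pfx ++ hex_char]) tmp) acc
    = acc ++ chars.flatMap (fun d => ps.map (fun p => p ++ d)) := by
  induction chars generalizing acc with
  | nil => simp
  | cons d ds ih =>
    simp only [List.foldl_cons, List.flatMap_cons]
    rw [PySem.List.foldl_append_singleton_eq_map, ih, List.append_assoc]

theorem pvBuild_append (chars : List String) (m : Nat) (l l' : List Char) (st : Nat × String) :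
    pvBuild chars m (l ++ l') st = pvBuild chars m l' (pvBuild chars m l st) := by
  induction l generalizing st with
  | nil => rfl
  | cons c rest ih =>
    obtain ⟨j, s⟩ := st
    by_cases hc : c = '*' <;> simp [pvBuild, hc, ih]

-- the first component after the walk is j divided by m^(number of '*')
theorem pvBuild_fst (chars : List String) (m : Nat) (l : List Char) (j : Nat) (s : String) :
    (pvBuild chars m l (j, s)).1 = j / m ^ l.count '*' := by
  induction l generalizing j s with
  | nil => simp [pvBuild]
  | cons c rest ih =>
    by_cases hc : c = '*'
    · simp [pvBuild, hc, ih, Nat.div_div_eq_div_mul, pow_succ, mul_comm]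
    · simp [pvBuild, hc, ih]

-- the string built depends on j only through j mod m^(number of '*')
theorem pvBuild_snd_mod (chars : List String) (m : Nat) (l : List Char) (j : Nat) (s : String) :
    (pvBuild chars m l (j, s)).2 = (pvBuild chars m l (j % m ^ l.count '*', s)).2 := by
  induction l generalizing j s with
  | nil => simp [pvBuild]
  | cons c rest ih =>
    by_cases hc : c = '*'
    · subst hc
      have h1 : j % m ^ (rest.count '*' + 1) % m = j % m :=
        Nat.mod_mod_of_dvd _ (dvd_pow_self m (Nat.succ_ne_zero _))
      have h2 : j % m ^ (rest.count '*' + 1) / m = j / m % m ^ rest.count '*' := by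
        rw [pow_succ, mul_comm, Nat.mod_mul_right_div_self]
      simp only [pvBuild, List.count_cons, beq_self_eq_true, if_pos]
      rw [h1, h2, ih (j / m)]
    · simp only [pvBuild, hc, List.count_cons, beq_iff_eq, if_false, Nat.add_zero]
      rw [ih j]

-- enumerate range (b*a) as an outer loop over the high digit, inner over the rest
theorem pv_range_mul_flatMap (a b : Nat) (f : Nat → String) :
    (List.range (b * a)).map f
    = (List.range a).flatMap (fun d => (List.range b).map (fun r => f (d * b + r))) := by
  induction a with
  | zero => simp
  | succ a ih =>
    rw [Nat.mul_succ, List.range_add, List.range_succ]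
    simp only [List.map_append, List.map_map, List.flatMap_append, List.flatMap_singleton, ih]
    congr 1
    simp [Function.comp, mul_comm a b]

-- flatMap over a list = flatMap over its index range
theorem pv_flatMap_range (chars : List String) (f : String → List String) :
    chars.flatMap f
    = (List.range chars.length).flatMap (fun d => f (chars.getD d "")) := by
  induction chars using List.reverseRecOn with
  | nil => simp
  | append_singleton xs c ih =>
    rw [List.flatMap_append, List.length_append, List.range_add, List.flatMap_append, ih]
    congr 1
    · apply List.flatMap_congr
      intro d hd
      rw [List.mem_range] at hd
      rw [List.getD_eq_getElem?_getD, List.getD_eq_getElem?_getD, List.getElem?_append_left hd]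
    · simp [List.getD_eq_getElem?_getD]

-- main: A's fold equals B's mixed-radix enumeration, for any chars
theorem pv_main (chars : List String) (l : List Char) :
    l.foldl (fun prefixes h =>
      if h = '*' then
        chars.foldl (fun tmp hex_char =>
          prefixes.foldl (fun tmp pfx => tmp ++ [pfx ++ hex_char]) tmp) []
      else
        prefixes.foldl (fun tmp pfx => tmp ++ [pfx ++ String.singleton h]) []) [""]
    = (List.range (chars.length ^ l.count '*')).map
        (fun i => (pvBuild chars (chars.length) l (i, "")).2) := by
  induction l using List.reverseRecOn with
  | nil => simp [pvBuild]
  | append_singleton xs c ih =>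
    rw [List.foldl_append, ih]
    simp only [List.foldl_cons, List.foldl_nil]
    by_cases hc : c = '*'
    · subst hc
      rw [if_pos rfl, pv_star_step, List.nil_append, pv_flatMap_range]
      have hcnt : (xs ++ ['*']).count '*' = xs.count '*' + 1 := by
        simp [List.count_append]
      rw [hcnt, pow_succ, pv_range_mul_flatMap]
      apply List.flatMap_congr
      intro d hd
      rw [List.mem_range] at hd
      simp only [List.map_map]
      apply List.map_congr_left
      intro r hr
      rw [List.mem_range] at hr
      have hpos : 0 < chars.length ^ xs.count '*' := Nat.lt_of_le_of_lt (Nat.zero_le r) hr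
      have hfst : (pvBuild chars chars.length xs (d * chars.length ^ xs.count '*' + r, "")).1
          = d := by
        rw [pvBuild_fst, mul_comm, Nat.mul_add_div hpos, Nat.div_eq_of_lt hr, Nat.add_zero]
      have hsnd : (pvBuild chars chars.length xs (d * chars.length ^ xs.count '*' + r, "")).2
          = (pvBuild chars chars.length xs (r, "")).2 := by
        rw [pvBuild_snd_mod, mul_comm d, Nat.mul_add_mod, Nat.mod_eq_of_lt hr]
      rcases hst : pvBuild chars chars.length xs (d * chars.length ^ xs.count '*' + r, "")
        with ⟨j', s'⟩
      rw [hst] at hfst hsnd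
      rw [pvBuild_append, hst]
      obtain rfl : j' = d := hfst
      obtain rfl : s' = (pvBuild chars chars.length xs (r, "")).2 := hsnd
      simp [pvBuild, Nat.mod_eq_of_lt hd]
    · rw [if_neg hc, PySem.List.foldl_append_singleton_eq_map, List.nil_append]
      have hcnt : (xs ++ [c]).count '*' = xs.count '*' := by
        simp [List.count_append, hc]
      rw [hcnt, List.map_map]
      apply List.map_congr_left
      intro i _
      simp only [Function.comp]
      rw [pvBuild_append]
      rcases hst : pvBuild chars chars.length xs (i, "") with ⟨j', s'⟩
      simp [pvBuild, hc]

-- ===== VERDICT (by name: the statement is the Claim_ definition above) =====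
theorem replace_wildcard3_spec : Claim_equal_replace_wildcard3 := by
  intro pattern start end_ _
  unfold Spec_replace_wildcard3 replace_wildcard3 replace_wildcard3_alt
  exact pv_main _ _
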